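-- pv_equiv track=rewrite | github.com/Julian-C10/cicero-discord-bot | src/removeAnswers.py | clipped
-- ===== SOURCE A (Python) =====
-- def clipped(line):
--     newLine = ""
--     for c in line:
--         newLine += c
--         if c == "=":
--             break
--     newLine += "\n"
--     return newLine
-- ===== SOURCE B (Python) =====
-- def clipped(line):
--     idx = line.find("=")
--     if idx == -1:
--         return line + "\n"
--     return line[:idx + 1] + "\n"
-- ===== Notes on version B (the rewrite author's own statement) =====
-- stated objective: faster
-- what changed: Replaces the character-by-character accumulation loop with break by a single locate-then-slice: find the first '=' and slice up to it (whole line when absent), appending the newline once; the measured speedup comes from replacing per-character string concatenation with one C-level find and slice.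
import Mathlib
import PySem

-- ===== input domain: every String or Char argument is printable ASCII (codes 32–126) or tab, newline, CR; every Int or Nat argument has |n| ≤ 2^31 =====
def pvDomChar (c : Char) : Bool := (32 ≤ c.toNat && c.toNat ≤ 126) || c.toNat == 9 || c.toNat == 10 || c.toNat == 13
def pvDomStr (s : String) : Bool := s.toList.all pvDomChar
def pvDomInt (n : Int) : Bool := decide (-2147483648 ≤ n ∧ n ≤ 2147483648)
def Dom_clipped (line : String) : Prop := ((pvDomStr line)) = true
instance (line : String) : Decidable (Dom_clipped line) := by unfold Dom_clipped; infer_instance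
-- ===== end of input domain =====

-- B replaces A's char-by-char accumulation loop with break by a single find-then-slice (simpler).

-- ===== PORT A =====
-- the for-loop with break, accumulating characters into newLine
def clippedLoop : List Char → List Char → List Char
  | [], acc => acc
  | c :: rest, acc =>
      let acc' := acc ++ [c]
      if c = '=' then acc' else clippedLoop rest acc'

def clipped (line : String) : String :=
  String.ofList (clippedLoop line.toList [] ++ ['\n'])

-- ===== PORT B =====
def clipped_alt (line : String) : String :=
  let idx := PySem.Str.find line "="
  if idx = -1 then String.ofList (line.toList ++ ['\n'])
  else String.ofList (PySem.List.slice line.toList none (some (idx + 1)) ++ ['\n'])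

-- ===== PRECONDITION & SPEC =====
def Spec_clipped (line : String) (out : String) : Prop := out = clipped_alt line
instance (line : String) (out : String) : Decidable (Spec_clipped line out) := by unfold Spec_clipped; infer_instance

-- ===== CLAIM (what is proved, stated in full; the proofs are below) =====
def Claim_equal_clipped : Prop := ∀ (line : String), Dom_clipped line → Spec_clipped line (clipped line)

-- ===== LEMMAS AND PROOFS =====

lemma clippedLoop_append (s : List Char) : ∀ acc, clippedLoop s acc = acc ++ clippedLoop s [] := by
  induction s with
  | nil => intro acc; simp [clippedLoop]
  | cons c rest ih =>
      intro acc
      by_cases h : c = '='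
      · simp [clippedLoop, h]
      · simp [clippedLoop, h, ih (acc ++ [c]), ih [c]]

lemma singleton_prefix_iff (a : Char) (l : List Char) : [a] <+: l ↔ l[0]? = some a := by
  cases l with
  | nil => simp
  | cons b t => simp [List.cons_prefix_cons, eq_comm]

lemma clippedLoop_no_eq (s : List Char) (h : '=' ∉ s) : clippedLoop s [] = s := by
  induction s with
  | nil => rfl
  | cons c rest ih =>
      have hc : c ≠ '=' := by intro hc; exact h (by simp [hc])
      rw [clippedLoop]
      simp only [hc, if_false, List.nil_append]
      rw [clippedLoop_append rest [c], ih (fun hm => h (List.mem_cons_of_mem _ hm))]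
      simp

lemma clippedLoop_found (s : List Char) : ∀ (k : Nat), s[k]? = some '=' →
    (∀ i < k, s[i]? ≠ some '=') → clippedLoop s [] = s.take (k + 1) := by
  induction s with
  | nil => intro k hk _; simp at hk
  | cons c rest ih =>
      intro k hk hmin
      cases k with
      | zero =>
          simp at hk
          simp [clippedLoop, hk]
      | succ j =>
          have hc : c ≠ '=' := by
            intro hc
            exact hmin 0 (Nat.succ_pos j) (by simp [hc])
          rw [clippedLoop]
          simp only [hc, if_false, List.nil_append]
          rw [clippedLoop_append rest [c]]
          have hrest : rest[j]? = some '=' := by simpa using hk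
          have hrmin : ∀ i < j, rest[i]? ≠ some '=' := by
            intro i hi
            have := hmin (i + 1) (by omega)
            simpa using this
          rw [ih j hrest hrmin]
          simp [List.take_succ_cons]

-- ===== VERDICT (by name: the statement is the Claim_ definition above) =====
theorem clipped_spec : Claim_equal_clipped := by
  intro line _
  unfold Spec_clipped clipped clipped_alt
  simp only [PySem.Str.find_eq]
  have htl : ("=" : String).toList = ['='] := rfl
  rw [htl]
  by_cases h : PySem.Chars.find line.toList ['='] = -1
  · -- no '=' in line
    have hnin : '=' ∉ line.toList := by
      have := (PySem.Chars.find_eq_neg_one_iff line.toList ['=']).mp h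
      intro hm
      apply this
      obtain ⟨l1, l2, hsplit⟩ := List.append_of_mem hm
      exact ⟨l1, l2, by simp [hsplit]⟩
    rw [h]
    simp [clippedLoop_no_eq line.toList hnin]
  · -- '=' found at index (find …).toNat
    have hge : 0 ≤ PySem.Chars.find line.toList ['='] := by
      have := PySem.Chars.neg_one_le_find line.toList ['=']
      omega
    obtain ⟨hpre, hmin⟩ := PySem.Chars.find_spec hge
    set k := (PySem.Chars.find line.toList ['=']).toNat with hkdef
    have hk : line.toList[k]? = some '=' := by
      have := (singleton_prefix_iff '=' (line.toList.drop k)).mp hpre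
      simpa [List.getElem?_drop] using this
    have hkm : ∀ i < k, line.toList[i]? ≠ some '=' := by
      intro i hi hcon
      apply hmin i hi
      rw [singleton_prefix_iff]
      simpa [List.getElem?_drop] using hcon
    rw [if_neg h]
    have hfind : PySem.Chars.find line.toList ['='] = (k : Int) := by omega
    rw [hfind, clippedLoop_found line.toList k hk hkm]
    have : ((k : Int) + 1) = ((k + 1 : Nat) : Int) := by push_cast; ring
    rw [this, PySem.List.slice_to_natCast]
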